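-- pv_equiv track=rewrite | github.com/ashikaacharya15/Bigdata-Management-and-Analytics | Spark/TopTen.py | find_common_friends
-- ===== SOURCE A (Python) =====
-- import collections
--
-- def find_common_friends(pairs_list):
--     pair = str(pairs_list[0])
--     friends_list = pairs_list[1]
--
--     counter = collections.Counter(friends_list)
--     common_friends = []
--     for key, value in counter.items():
--         if value > 1:
--             common_friends.append(int(key))
--     common_friends.sort()
--     if len(common_friends) > 0:
--         return str(pair + "\t" + str(common_friends).replace("[","").replace("]",""))
--     else:
--         return str(pair)
-- ===== SOURCE B (Python) =====
-- def find_common_friends(pairs_list):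
--     pair = str(pairs_list[0])
--     friends = sorted(pairs_list[1])
--     n = len(friends)
--     common_friends = []
--     i = 0
--     while i < n:
--         x = friends[i]
--         j = i + 1
--         while j < n and friends[j] == x:
--             j += 1
--         run = j - i
--         if run > 1:
--             common_friends.append(int(x))
--         i = j
--     if len(common_friends) > 0:
--         return str(pair + "\t" + str(common_friends).replace("[","").replace("]",""))
--     else:
--         return str(pair)
-- ===== Notes on version B (the rewrite author's own statement) =====
-- stated objective: alternative
-- what changed: Replaces Counter-based hash counting followed by a final sort with sorting the friends list first and then scanning it once, collapsing runs of equal adjacent elements and keeping those with run length > 1 (already in sorted order).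
import Mathlib
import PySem

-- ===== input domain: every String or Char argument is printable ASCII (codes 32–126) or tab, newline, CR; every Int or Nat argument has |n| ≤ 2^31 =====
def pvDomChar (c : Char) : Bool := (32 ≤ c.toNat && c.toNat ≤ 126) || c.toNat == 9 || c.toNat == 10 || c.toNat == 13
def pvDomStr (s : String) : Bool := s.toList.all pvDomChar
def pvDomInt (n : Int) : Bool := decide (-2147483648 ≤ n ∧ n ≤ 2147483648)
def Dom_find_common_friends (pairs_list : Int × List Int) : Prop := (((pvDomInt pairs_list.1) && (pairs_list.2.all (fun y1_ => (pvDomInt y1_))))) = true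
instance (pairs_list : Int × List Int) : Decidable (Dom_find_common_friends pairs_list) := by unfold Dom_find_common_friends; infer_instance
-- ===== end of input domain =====

-- B replaces Counter-based hash counting + final sort by sort-then-scan of adjacent runs (alternative decomposition, same cost).


-- ===== PORT A =====
-- str(l) for a Python list of ints: "[x, y, …]"
def pyStrIntList (l : List Int) : String :=
  "[" ++ PySem.Str.join ", " (l.map PySem.Int.toStr) ++ "]"

def find_common_friends (pairs_list : Int × List Int) : String :=
  let pair := PySem.Int.toStr pairs_list.1
  let friends_list := pairs_list.2
  let counter := PySem.Dict.counter friends_list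
  let common_friends :=
    counter.items.foldl (fun acc kv => if kv.2 > 1 then acc ++ [kv.1] else acc) ([] : List Int)
  let common_friends := PySem.List.sorted common_friends (fun x => x)
  if common_friends.length > 0 then
    PySem.Str.replace (PySem.Str.replace (pyStrIntList common_friends) "[" "") "]" ""
    |> (fun s => pair ++ "\t" ++ s)
  else
    pair

-- ===== PORT B =====
-- the outer while loop of Source B: peel the run of elements equal to the head, keep the head iff the run has length > 1
def runScan : List Int → List Int
  | [] => []
  | x :: rest =>
    let run := 1 + (rest.takeWhile (fun y => y == x)).length
    let rest' := rest.dropWhile (fun y => y == x)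
    if run > 1 then x :: runScan rest' else runScan rest'
  termination_by l => l.length
  decreasing_by all_goals
    exact Nat.lt_succ_of_le (List.length_dropWhile_le _ _)

def find_common_friends_alt (pairs_list : Int × List Int) : String :=
  let pair := PySem.Int.toStr pairs_list.1
  let common_friends := runScan (PySem.List.sorted pairs_list.2 (fun x => x))
  if common_friends.length > 0 then
    PySem.Str.replace (PySem.Str.replace (pyStrIntList common_friends) "[" "") "]" ""
    |> (fun s => pair ++ "\t" ++ s)
  else
    pair

-- ===== PRECONDITION & SPEC =====
def Spec_find_common_friends (pairs_list : Int × List Int) (out : String) : Prop := out = find_common_friends_alt pairs_list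
instance (pairs_list : Int × List Int) (out : String) : Decidable (Spec_find_common_friends pairs_list out) := by unfold Spec_find_common_friends; infer_instance

-- ===== CLAIM (what is proved, stated in full; the proofs are below) =====
def Claim_equal_find_common_friends : Prop := ∀ (pairs_list : Int × List Int), Dom_find_common_friends pairs_list → Spec_find_common_friends pairs_list (find_common_friends pairs_list)

-- ===== LEMMAS AND PROOFS =====

theorem runScan_subset (xs : List Int) : ∀ a ∈ runScan xs, a ∈ xs := by
  fun_induction runScan with
  | case1 => simp
  | case2 x rest run rest' hif ih =>
    intro a ha
    rcases List.mem_cons.mp ha with h | h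
    · simp [h]
    · exact List.mem_cons_of_mem _ ((rest.dropWhile_sublist _).mem (ih a h))
  | case3 x rest run rest' hif ih =>
    intro a ha
    exact List.mem_cons_of_mem _ ((rest.dropWhile_sublist _).mem (ih a ha))

theorem lt_of_mem_dropWhile {x : Int} {rest : List Int}
    (h : (x :: rest).Pairwise (· ≤ ·)) :
    ∀ y ∈ rest.dropWhile (fun y => y == x), x < y := by
  have hle : ∀ y ∈ rest, x ≤ y := (List.pairwise_cons.mp h).1
  have hrest : rest.Pairwise (· ≤ ·) := (List.pairwise_cons.mp h).2
  cases hd : rest.dropWhile (fun y => y == x) with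
  | nil => simp
  | cons z t =>
    have hz : (z == x) = false := by
      have h0 := List.head?_dropWhile_not (fun y => y == x) rest
      rw [hd] at h0; exact h0
    have hzmem : z ∈ rest := (rest.dropWhile_sublist _).mem (by rw [hd]; simp)
    have hxz : x < z := lt_of_le_of_ne (hle z hzmem) (Ne.symm (by simpa using hz))
    have hdw : (z :: t).Pairwise (· ≤ ·) := hd ▸ hrest.sublist (rest.dropWhile_sublist _)
    intro y hy
    rcases List.mem_cons.mp hy with rfl | hyt
    · exact hxz
    · exact lt_of_lt_of_le hxz ((List.pairwise_cons.mp hdw).1 y hyt)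

theorem count_eq_zero_of_forall_lt {x : Int} {l : List Int}
    (h : ∀ y ∈ l, x < y) : l.count x = 0 :=
  List.count_eq_zero.mpr (fun hmem => lt_irrefl x (h x hmem))

theorem runScan_mem (xs : List Int) (hs : xs.Pairwise (· ≤ ·)) :
    ∀ a, a ∈ runScan xs ↔ 2 ≤ xs.count a := by
  fun_induction runScan with
  | case1 => simp
  | case2 x rest run rest' hif ih =>
    intro a
    have hcons := List.pairwise_cons.mp hs
    have hrest' : rest'.Pairwise (· ≤ ·) := hcons.2.sublist (rest.dropWhile_sublist _)
    have hlt : ∀ y ∈ rest', x < y := lt_of_mem_dropWhile hs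
    have hsplit : rest = rest.takeWhile (fun y => y == x) ++ rest' :=
      (rest.takeWhile_append_dropWhile (p := fun y => y == x)).symm
    have htw : ∀ y ∈ rest.takeWhile (fun y => y == x), y = x := by
      intro y hy
      have := List.mem_takeWhile_imp hy
      simpa using this
    by_cases hax : a = x
    · subst hax
      constructor
      · intro _
        have : rest'.count a = 0 := count_eq_zero_of_forall_lt hlt
        have hrun : 0 < (rest.takeWhile (fun y => y == a)).length := by
          simp only [run] at hif; omega
        have hcl : (rest.takeWhile (fun y => y == a)).count a =
            (rest.takeWhile (fun y => y == a)).length :=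
          List.count_eq_length.mpr (fun y hy => ((htw y hy).symm : a = y))
        rw [hsplit]
        simp only [rest'] at this
        simp [List.count_append]
        omega
      · intro _; exact List.mem_cons_self
    · have htwc : (rest.takeWhile (fun y => y == x)).count a = 0 :=
        List.count_eq_zero.mpr (fun hmem => hax (htw a hmem))
      have hcnt : List.count a (x :: rest) = List.count a rest' := by
        rw [hsplit]
        simp only [List.count_cons, List.count_append, htwc]
        have : (x == a) = false := by simpa using fun h => hax h.symm
        simp [this]
      rw [hcnt, ← ih hrest']
      simp [hax]
  | case3 x rest run rest' hif ih =>
    intro a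
    have hcons := List.pairwise_cons.mp hs
    have hrest'eq : rest' = rest := by
      simp only [run] at hif
      have : (rest.takeWhile (fun y => y == x)).length = 0 := by omega
      have htw : rest.takeWhile (fun y => y == x) = [] := List.length_eq_zero_iff.mp this
      simp only [rest']
      conv_rhs => rw [← rest.takeWhile_append_dropWhile (p := fun y => y == x)]
      rw [htw]
      simp
    have hrest' : rest'.Pairwise (· ≤ ·) := hrest'eq ▸ hcons.2
    have hlt : ∀ y ∈ rest', x < y := lt_of_mem_dropWhile hs
    rw [ih hrest']
    by_cases hax : a = x
    · subst hax
      have h0 : rest'.count a = 0 := count_eq_zero_of_forall_lt hlt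
      rw [hrest'eq] at h0
      rw [hrest'eq]
      simp [h0]
    · rw [hrest'eq]
      have : (x == a) = false := by simpa using fun h => hax h.symm
      simp [List.count_cons, this]

theorem runScan_pairwise (xs : List Int) (hs : xs.Pairwise (· ≤ ·)) :
    (runScan xs).Pairwise (· < ·) := by
  fun_induction runScan with
  | case1 => simp
  | case2 x rest run rest' hif ih =>
    have hcons := List.pairwise_cons.mp hs
    have hrest' : rest'.Pairwise (· ≤ ·) := hcons.2.sublist (rest.dropWhile_sublist _)
    have hlt : ∀ y ∈ rest', x < y := lt_of_mem_dropWhile hs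
    exact List.pairwise_cons.mpr
      ⟨fun y hy => hlt y (runScan_subset rest' y hy), ih hrest'⟩
  | case3 x rest run rest' hif ih =>
    have hcons := List.pairwise_cons.mp hs
    have hrest' : rest'.Pairwise (· ≤ ·) := hcons.2.sublist (rest.dropWhile_sublist _)
    exact ih hrest'

-- the two common-friends lists agree
theorem lists_eq (xs : List Int) :
    PySem.List.sorted
      ((PySem.Dict.counter xs).items.foldl
        (fun acc kv => if kv.2 > 1 then acc ++ [kv.1] else acc) ([] : List Int))
      (fun x => x)
    = runScan (PySem.List.sorted xs (fun x => x)) := by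
  have hsorted : (PySem.List.sorted xs (fun x => x)).Pairwise (· ≤ ·) :=
    PySem.List.sorted_pairwise xs (fun x => x)
  have hfold :
      (PySem.Dict.counter xs).items.foldl
        (fun acc kv => if kv.2 > 1 then acc ++ [kv.1] else acc) ([] : List Int)
      = ((PySem.Set.ofList xs : List Int).filter
          (fun k => decide (1 < (xs.count k : Int)))).map (fun k => k) := by
    rw [PySem.Dict.items_counter]
    rw [show (fun acc (kv : Int × Int) => if kv.2 > 1 then acc ++ [kv.1] else acc)
        = (fun acc kv => if (fun (kv : Int × Int) => decide (1 < kv.2)) kv = true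
            then acc ++ [(fun (kv : Int × Int) => kv.1) kv] else acc) by
      funext acc kv; by_cases h : (1 : Int) < kv.2 <;> simp [h]]
    rw [PySem.List.foldl_append_if]
    simp [List.filter_map, Function.comp_def]
  rw [hfold]
  apply PySem.List.sorted_eq_of_perm_of_pairwise_lt
  · apply List.perm_of_nodup_nodup_toFinset_eq
    · exact (runScan_pairwise _ hsorted).imp ne_of_lt
    · exact ((PySem.Set.nodup_ofList xs).filter _).map_on (by intro a _ b _ h; exact h)
    · ext a
      simp only [List.mem_toFinset, List.mem_map, List.mem_filter]
      rw [runScan_mem _ hsorted a,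
          (PySem.List.sorted_perm xs (fun x => x) false).count_eq]
      constructor
      · intro h
        exact ⟨a, ⟨(PySem.Set.mem_ofList xs a).mpr (List.count_pos_iff.mp (by omega)),
          by simp; omega⟩, rfl⟩
      · rintro ⟨b, ⟨_, hb⟩, rfl⟩
        simp at hb; omega
  · exact (runScan_pairwise _ hsorted).imp (fun h => h)

-- ===== VERDICT (by name: the statement is the Claim_ definition above) =====
theorem find_common_friends_spec : Claim_equal_find_common_friends := by
  intro pairs_list _
  show find_common_friends pairs_list = find_common_friends_alt pairs_list
  simp only [find_common_friends, find_common_friends_alt, lists_eq]
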